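-- pv_equiv track=rewrite | github.com/fikreanteneh/competitive-programming | #02.contest/E_Beautiful_Path.py | check
-- ===== SOURCE A (Python) =====
-- def check(arr, n, m):
--
--     for i in range(n):
--         last = "*"
--         for j in range(m):
--             if (arr[i][j], last) == ("T", "S") or (arr[i][j], last) == ("S", "T"):
--                 return True
--             if arr[i][j] != ".":
--                 last = arr[i][j]
--     for j in range(m):
--         last = "*"
--         for i in range(n):
--             if (arr[i][j], last) == ("T", "S") or (arr[i][j], last) == ("S", "T"):
--                 return True
--             if arr[i][j] != ".":
--                 last = arr[i][j]
--     return False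
-- ===== SOURCE B (Python) =====
-- def check(arr, n, m):
--     def line_ok(cells):
--         ss = [k for k, c in enumerate(cells) if c == "S"]
--         ts = [k for k, c in enumerate(cells) if c == "T"]
--         return any(all(c == "." for c in cells[min(s, t) + 1:max(s, t)])
--                    for s in ss for t in ts)
--     rows = [[arr[i][j] for j in range(m)] for i in range(n)]
--     cols = [[arr[i][j] for i in range(n)] for j in range(m)]
--     return any(line_ok(line) for line in rows + cols)
-- ===== Notes on version B (the rewrite author's own statement) =====
-- stated objective: alternative
-- what changed: Replaces A's sequential running-'last' state machine per row/column by collecting every S position and every T position of the line and brute-force testing each (S,T) index pair for an all-dots gap between them (pair enumeration + betweenness check instead of a linear scan with carried state).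
-- outside the precondition, e.g. on check([['S', 'T']], 1, 5): A returns True, B raises IndexError
import Mathlib
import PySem

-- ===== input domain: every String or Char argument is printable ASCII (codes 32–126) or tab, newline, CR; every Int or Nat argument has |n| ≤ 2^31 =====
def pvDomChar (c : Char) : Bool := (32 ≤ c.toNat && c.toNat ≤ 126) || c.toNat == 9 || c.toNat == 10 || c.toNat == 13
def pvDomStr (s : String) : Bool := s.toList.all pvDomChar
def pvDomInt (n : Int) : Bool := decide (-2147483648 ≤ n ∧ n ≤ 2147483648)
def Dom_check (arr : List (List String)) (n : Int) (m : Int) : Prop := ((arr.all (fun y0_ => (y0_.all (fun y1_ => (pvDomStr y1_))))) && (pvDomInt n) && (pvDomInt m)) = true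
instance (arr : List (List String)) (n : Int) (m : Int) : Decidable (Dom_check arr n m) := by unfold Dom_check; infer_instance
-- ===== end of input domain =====

-- B replaces A's running 'last' state machine by enumerating all S positions and all T
-- positions of each line and brute-force testing each (S,T) pair for an all-dots gap
-- between them (objective: alternative algorithm, similar cost on these inputs).

-- ===== PORT A =====
-- arr[i][j]; the none case is Python's IndexError, excluded by Pre_check
def pvCell (arr : List (List String)) (i j : Int) : String :=
  (PySem.List.pyGet? ((PySem.List.pyGet? arr i).getD []) j).getD ""

-- inner 'for j in range(m)' of the row pass, carrying 'last'
def pvRowLoop (arr : List (List String)) (i : Int) : List Int → String → Bool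
  | [], _ => false
  | j :: js, last =>
    let c := pvCell arr i j
    if (c = "T" ∧ last = "S") ∨ (c = "S" ∧ last = "T") then true
    else pvRowLoop arr i js (if c ≠ "." then c else last)

-- inner 'for i in range(n)' of the column pass, carrying 'last'
def pvColLoop (arr : List (List String)) (j : Int) : List Int → String → Bool
  | [], _ => false
  | i :: is, last =>
    let c := pvCell arr i j
    if (c = "T" ∧ last = "S") ∨ (c = "S" ∧ last = "T") then true
    else pvColLoop arr j is (if c ≠ "." then c else last)

-- outer 'for i in range(n)' with early return True
def pvRowsLoop (arr : List (List String)) (m : Int) : List Int → Bool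
  | [] => false
  | i :: is =>
    if pvRowLoop arr i (PySem.List.pyRange 0 m 1) "*" then true else pvRowsLoop arr m is

-- outer 'for j in range(m)' with early return True
def pvColsLoop (arr : List (List String)) (n : Int) : List Int → Bool
  | [] => false
  | j :: js =>
    if pvColLoop arr j (PySem.List.pyRange 0 n 1) "*" then true else pvColsLoop arr n js

def check (arr : List (List String)) (n : Int) (m : Int) : Bool :=
  if pvRowsLoop arr m (PySem.List.pyRange 0 n 1) then true
  else if pvColsLoop arr n (PySem.List.pyRange 0 m 1) then true
  else false

-- ===== PORT B =====
-- [k for k, c in enumerate(cells) if c == ch]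
def pvMarks (cells : List String) (ch : String) : List Int :=
  ((PySem.List.enumerate cells 0).filter (fun kc => kc.2 == ch)).map Prod.fst

-- all(c == "." for c in cells[min(s,t)+1:max(s,t)])
def pvClear (cells : List String) (s t : Int) : Bool :=
  (PySem.List.slice cells (some (min s t + 1)) (some (max s t))).all (fun c => c == ".")

-- any(... for s in ss for t in ts)
def pvLineOk (cells : List String) : Bool :=
  (pvMarks cells "S").any (fun s => (pvMarks cells "T").any (fun t => pvClear cells s t))

def check_alt (arr : List (List String)) (n : Int) (m : Int) : Bool :=
  let rows := (PySem.List.pyRange 0 n 1).map (fun i =>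
    (PySem.List.pyRange 0 m 1).map (fun j => pvCell arr i j))
  let cols := (PySem.List.pyRange 0 m 1).map (fun j =>
    (PySem.List.pyRange 0 n 1).map (fun i => pvCell arr i j))
  (rows ++ cols).any pvLineOk

-- ===== PRECONDITION & SPEC =====
-- Pre_check excludes inputs on which an accessed index arr[i][j] (i < n, j < m) is out of
-- range: there Python A raises IndexError, except that A may still return True by an early
-- exit before reaching the bad index (see the cited example); B raises there too.
def Pre_check (arr : List (List String)) (n : Int) (m : Int) : Prop :=
  (n ≤ arr.length ∨ m ≤ 0) ∧ ∀ row ∈ arr.take n.toNat, m ≤ row.length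

instance (arr : List (List String)) (n : Int) (m : Int) : Decidable (Pre_check arr n m) := by
  unfold Pre_check; infer_instance

def pvWitness_check : List (List String) × Int × Int := ([["S", ".", "T"]], 1, 3)

def Spec_check (arr : List (List String)) (n : Int) (m : Int) (out : Bool) : Prop := out = check_alt arr n m
instance (arr : List (List String)) (n : Int) (m : Int) (out : Bool) : Decidable (Spec_check arr n m out) := by unfold Spec_check; infer_instance

-- ===== CLAIM (what is proved, stated in full; the proofs are below) =====
def Claim_equal_check : Prop := ∀ (arr : List (List String)) (n : Int) (m : Int), Dom_check arr n m → Pre_check arr n m → Spec_check arr n m (check arr n m)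

-- ===== LEMMAS AND PROOFS =====

-- proof-side: the dot-compressed line and its adjacent-pair scan (a characterisation of
-- A's state machine; B itself never computes it)
def pvCompress (cells : List String) : List String := cells.filter (fun c => c ≠ ".")

def pvHasPair (comp : List String) : Bool :=
  (comp.zip (comp.drop 1)).any (fun p => (p.1 = "S" ∧ p.2 = "T") ∨ (p.1 = "T" ∧ p.2 = "S"))

-- proof-side: the common existential characterisation "an S and a T with only dots between"
def pvP (cells : List String) : Prop :=
  ∃ (p q : Nat) (hp : p < cells.length) (hq : q < cells.length), p < q ∧
    ((cells[p] = "S" ∧ cells[q] = "T") ∨ (cells[p] = "T" ∧ cells[q] = "S")) ∧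
    ∀ (k : Nat) (hk : k < cells.length), p < k → k < q → cells[k] = "."

-- "some S/T directly reachable from a head c through dots"
def pvQ (c : String) (rest : List String) : Prop :=
  ∃ (q : Nat) (hq : q < rest.length),
    ((c = "S" ∧ rest[q] = "T") ∨ (c = "T" ∧ rest[q] = "S")) ∧
    ∀ (k : Nat) (hk : k < rest.length), k < q → rest[k] = "."

lemma pvHasPair_cons₂ (a b : String) (l : List String) :
    pvHasPair (a :: b :: l) =
      ((decide ((a = "S" ∧ b = "T") ∨ (a = "T" ∧ b = "S"))) || pvHasPair (b :: l)) := by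
  simp [pvHasPair]

def pvHeadB (c : String) (rest : List String) : Bool :=
  match (pvCompress rest).head? with
  | some d => decide ((c = "S" ∧ d = "T") ∨ (c = "T" ∧ d = "S"))
  | none => false

lemma pvHP_compress_cons (c : String) (rest : List String) :
    pvHasPair (pvCompress (c :: rest)) = (pvHeadB c rest || pvHasPair (pvCompress rest)) := by
  by_cases hc : c = "."
  · have h1 : pvCompress (c :: rest) = pvCompress rest := by simp [pvCompress, hc]
    have h2 : pvHeadB c rest = false := by
      unfold pvHeadB
      cases (pvCompress rest).head? with
      | none => rfl
      | some d => simp [hc]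
    rw [h1, h2, Bool.false_or]
  · have h1 : pvCompress (c :: rest) = c :: pvCompress rest := by simp [pvCompress, hc]
    rw [h1]
    cases h : pvCompress rest with
    | nil => simp [pvHasPair, pvHeadB, h]
    | cons d t =>
      rw [pvHasPair_cons₂]
      simp [pvHeadB, h]

lemma pvQ_iff_headB (c : String) (rest : List String) :
    pvHeadB c rest = true ↔ pvQ c rest := by
  induction rest with
  | nil =>
    simp [pvHeadB, pvCompress, pvQ]
  | cons r rs ih =>
    by_cases hr : r = "."
    · have h1 : pvHeadB c (r :: rs) = pvHeadB c rs := by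
        unfold pvHeadB; simp [pvCompress, hr]
      rw [h1, ih]
      constructor
      · rintro ⟨q, hq, hopp, hdots⟩
        refine ⟨q + 1, by simpa using Nat.succ_lt_succ hq, by simpa using hopp, ?_⟩
        intro k hk hkq
        cases k with
        | zero => simpa using hr
        | succ k' =>
          have : k' < rs.length := by simpa using Nat.lt_of_succ_lt_succ hk
          simpa using hdots k' this (Nat.lt_of_succ_lt_succ hkq)
      · rintro ⟨q, hq, hopp, hdots⟩
        cases q with
        | zero =>
          exfalso
          rcases hopp with ⟨_, h⟩ | ⟨_, h⟩ <;> simp [hr] at h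
        | succ q' =>
          have hq' : q' < rs.length := by simpa using Nat.lt_of_succ_lt_succ hq
          refine ⟨q', hq', by simpa using hopp, ?_⟩
          intro k hk hkq
          have := hdots (k + 1) (by simpa using Nat.succ_lt_succ hk) (Nat.succ_lt_succ hkq)
          simpa using this
    · have h1 : pvHeadB c (r :: rs) =
          decide ((c = "S" ∧ r = "T") ∨ (c = "T" ∧ r = "S")) := by
        unfold pvHeadB; simp [pvCompress, hr]
      rw [h1]
      constructor
      · intro h
        exact ⟨0, by simp, by simpa using of_decide_eq_true h, by intro k hk hkq; omega⟩
      · rintro ⟨q, hq, hopp, hdots⟩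
        cases q with
        | zero => simpa using hopp
        | succ q' =>
          exfalso
          exact hr (by simpa using hdots 0 (by simp) (Nat.succ_pos _))
  
lemma pvP_cons (c : String) (rest : List String) :
    pvP (c :: rest) ↔ pvQ c rest ∨ pvP rest := by
  constructor
  · rintro ⟨p, q, hp, hq, hpq, hopp, hdots⟩
    cases p with
    | zero =>
      left
      cases q with
      | zero => omega
      | succ q' =>
        have hq' : q' < rest.length := by simpa using Nat.lt_of_succ_lt_succ hq
        refine ⟨q', hq', by simpa using hopp, ?_⟩
        intro k hk hkq
        have := hdots (k + 1) (by simpa using Nat.succ_lt_succ hk) (Nat.succ_pos _)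
          (Nat.succ_lt_succ hkq)
        simpa using this
    | succ p' =>
      right
      cases q with
      | zero => omega
      | succ q' =>
        have hp' : p' < rest.length := by simpa using Nat.lt_of_succ_lt_succ hp
        have hq' : q' < rest.length := by simpa using Nat.lt_of_succ_lt_succ hq
        refine ⟨p', q', hp', hq', by omega, by simpa using hopp, ?_⟩
        intro k hk h1 h2
        have := hdots (k + 1) (by simpa using Nat.succ_lt_succ hk) (by omega) (by omega)
        simpa using this
  · rintro (⟨q, hq, hopp, hdots⟩ | ⟨p, q, hp, hq, hpq, hopp, hdots⟩)
    · refine ⟨0, q + 1, by simp, by simpa using Nat.succ_lt_succ hq, Nat.succ_pos _,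
        by simpa using hopp, ?_⟩
      intro k hk h1 h2
      cases k with
      | zero => omega
      | succ k' =>
        have hk' : k' < rest.length := by simpa using Nat.lt_of_succ_lt_succ hk
        simpa using hdots k' hk' (Nat.lt_of_succ_lt_succ h2)
    · refine ⟨p + 1, q + 1, by simpa using Nat.succ_lt_succ hp,
        by simpa using Nat.succ_lt_succ hq, by omega, by simpa using hopp, ?_⟩
      intro k hk h1 h2
      cases k with
      | zero => omega
      | succ k' =>
        have hk' : k' < rest.length := by simpa using Nat.lt_of_succ_lt_succ hk
        simpa using hdots k' hk' (by omega) (by omega)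

lemma pvHP_iff_P (cells : List String) :
    pvHasPair (pvCompress cells) = true ↔ pvP cells := by
  induction cells with
  | nil =>
    simp [pvCompress, pvHasPair, pvP]
  | cons c rest ih =>
    rw [pvHP_compress_cons, Bool.or_eq_true, ih, pvQ_iff_headB, pvP_cons]

-- membership in B's marker list
lemma pvMem_marks (cells : List String) (ch : String) (s : Int) :
    s ∈ pvMarks cells ch ↔ ∃ (k : Nat) (hk : k < cells.length), s = (k : Int) ∧ cells[k] = ch := by
  unfold pvMarks
  constructor
  · intro h
    simp only [List.mem_map, List.mem_filter, PySem.List.mem_enumerate_iff] at h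
    obtain ⟨⟨a, b⟩, ⟨⟨k, hk, heq⟩, hb⟩, hfst⟩ := h
    simp only [Prod.mk.injEq] at heq
    obtain ⟨ha, hb'⟩ := heq
    refine ⟨k, hk, ?_, ?_⟩
    · simp only at hfst
      omega
    · simp only at hb
      rw [← hb', eq_of_beq hb]
  · rintro ⟨k, hk, rfl, hck⟩
    simp only [List.mem_map, List.mem_filter, PySem.List.mem_enumerate_iff]
    exact ⟨(0 + (k : Int), cells[k]), ⟨⟨k, hk, rfl⟩, by simp [hck]⟩, by simp⟩

-- cells[min+1:max] is all dots ↔ everything strictly between is "."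
lemma pvMem_drop_take {α : Type} (l : List α) (a b : Nat) (x : α) :
    x ∈ (l.drop a).take b ↔ ∃ (k : Nat) (hk : k < l.length), a ≤ k ∧ k < a + b ∧ l[k] = x := by
  rw [List.mem_iff_getElem]
  constructor
  · rintro ⟨i, hi, hx⟩
    have hlen : i < min b (l.length - a) := by simpa [List.length_take, List.length_drop] using hi
    have hia : a + i < l.length := by omega
    refine ⟨a + i, hia, by omega, by omega, ?_⟩
    rw [← hx]
    rw [List.getElem_take, List.getElem_drop]
  · rintro ⟨k, hk, hak, hkb, hx⟩
    have hi : k - a < ((l.drop a).take b).length := by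
      simp [List.length_take, List.length_drop]; omega
    refine ⟨k - a, hi, ?_⟩
    rw [List.getElem_take, List.getElem_drop, ← hx]
    congr 1
    omega

lemma pvClear_iff (cells : List String) (ks kt : Nat) :
    pvClear cells (ks : Int) (kt : Int) = true ↔
      ∀ (k : Nat) (hk : k < cells.length), min ks kt < k → k < max ks kt → cells[k] = "." := by
  unfold pvClear
  have h1 : min (ks : Int) (kt : Int) + 1 = ((min ks kt + 1 : Nat) : Int) := by
    push_cast; omega
  have h2 : max (ks : Int) (kt : Int) = ((max ks kt : Nat) : Int) := by
    push_cast; omega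
  rw [h1, h2, PySem.List.slice_natCast]
  rw [List.all_eq_true]
  constructor
  · intro h k hk h3 h4
    have : cells[k] ∈ (cells.drop (min ks kt + 1)).take (max ks kt - (min ks kt + 1)) := by
      rw [pvMem_drop_take]
      exact ⟨k, hk, by omega, by omega, rfl⟩
    simpa using h _ this
  · intro h x hx
    rw [pvMem_drop_take] at hx
    obtain ⟨k, hk, h3, h4, hx⟩ := hx
    have := h k hk (by omega) (by omega)
    simp [← hx, this]

lemma pvLineOk_iff_P (cells : List String) :
    pvLineOk cells = true ↔ pvP cells := by
  unfold pvLineOk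
  rw [List.any_eq_true]
  constructor
  · rintro ⟨s, hs, hrest⟩
    rw [List.any_eq_true] at hrest
    obtain ⟨t, ht, hclear⟩ := hrest
    rw [pvMem_marks] at hs ht
    obtain ⟨ks, hks, rfl, hSs⟩ := hs
    obtain ⟨kt, hkt, rfl, hTt⟩ := ht
    rw [pvClear_iff] at hclear
    have hne : ks ≠ kt := by
      intro h
      subst h
      rw [hSs] at hTt
      exact absurd hTt (by decide)
    rcases Nat.lt_or_ge ks kt with hlt | hge
    · exact ⟨ks, kt, hks, hkt, hlt, Or.inl ⟨hSs, hTt⟩, fun k hk h1 h2 =>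
        hclear k hk (by omega) (by omega)⟩
    · have hlt : kt < ks := by omega
      exact ⟨kt, ks, hkt, hks, hlt, Or.inr ⟨hTt, hSs⟩, fun k hk h1 h2 =>
        hclear k hk (by omega) (by omega)⟩
  · rintro ⟨p, q, hp, hq, hpq, hopp, hdots⟩
    rcases hopp with ⟨hS, hT⟩ | ⟨hT, hS⟩
    · refine ⟨(p : Int), (pvMem_marks _ _ _).mpr ⟨p, hp, rfl, hS⟩, ?_⟩
      rw [List.any_eq_true]
      refine ⟨(q : Int), (pvMem_marks _ _ _).mpr ⟨q, hq, rfl, hT⟩, ?_⟩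
      rw [pvClear_iff]
      intro k hk h1 h2
      exact hdots k hk (by omega) (by omega)
    · refine ⟨(q : Int), (pvMem_marks _ _ _).mpr ⟨q, hq, rfl, hS⟩, ?_⟩
      rw [List.any_eq_true]
      refine ⟨(p : Int), (pvMem_marks _ _ _).mpr ⟨p, hp, rfl, hT⟩, ?_⟩
      rw [pvClear_iff]
      intro k hk h1 h2
      exact hdots k hk (by omega) (by omega)

lemma pvLineOk_eq_HP (cells : List String) :
    pvLineOk cells = pvHasPair (pvCompress cells) := by
  cases h : pvHasPair (pvCompress cells)
  · cases h' : pvLineOk cells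
    · rfl
    · exfalso
      have := (pvLineOk_iff_P cells).mp h'
      have := (pvHP_iff_P cells).mpr this
      rw [h] at this; exact Bool.false_ne_true this
  · exact (pvLineOk_iff_P cells).mpr ((pvHP_iff_P cells).mp h)

-- an adjacent pair starting at a non-'S'/'T' head never fires
lemma pvHasPair_cons_skip (x : String) (l : List String) (h1 : x ≠ "S") (h2 : x ≠ "T") :
    pvHasPair (x :: l) = pvHasPair l := by
  cases l with
  | nil => simp [pvHasPair]
  | cons y t => simp [pvHasPair, h1, h2]

-- A's state machine over cells js with current 'last' = pairwise scan of last :: compressed cells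
lemma pvRowLoop_eq (arr : List (List String)) (i : Int) :
    ∀ (js : List Int) (last : String),
      pvRowLoop arr i js last = pvHasPair (last :: pvCompress (js.map (pvCell arr i))) := by
  intro js
  induction js with
  | nil => intro last; simp [pvRowLoop, pvCompress, pvHasPair]
  | cons j js ih =>
    intro last
    by_cases hc : pvCell arr i j = "."
    · simp [pvRowLoop, pvCompress, hc, ih last]
    · have hlast : (if pvCell arr i j ≠ "." then pvCell arr i j else last) = pvCell arr i j :=
        if_pos hc
      have hcomp : pvCompress (List.map (pvCell arr i) (j :: js)) =
          pvCell arr i j :: pvCompress (List.map (pvCell arr i) js) := by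
        simp [pvCompress, hc]
      rw [pvRowLoop, hlast, ih (pvCell arr i j), hcomp, pvHasPair_cons₂]
      by_cases hp : (pvCell arr i j = "T" ∧ last = "S") ∨ (pvCell arr i j = "S" ∧ last = "T")
      · have hp' : (last = "S" ∧ pvCell arr i j = "T") ∨ (last = "T" ∧ pvCell arr i j = "S") := by
          tauto
        simp [hp, hp']
      · have hp' : ¬ ((last = "S" ∧ pvCell arr i j = "T") ∨ (last = "T" ∧ pvCell arr i j = "S")) := by
          tauto
        simp [hp, hp']

lemma pvColLoop_eq (arr : List (List String)) (j : Int) :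
    ∀ (is : List Int) (last : String),
      pvColLoop arr j is last = pvHasPair (last :: pvCompress (is.map (fun i => pvCell arr i j))) := by
  intro is
  induction is with
  | nil => intro last; simp [pvColLoop, pvCompress, pvHasPair]
  | cons i is ih =>
    intro last
    by_cases hc : pvCell arr i j = "."
    · simp [pvColLoop, pvCompress, hc, ih last]
    · have hlast : (if pvCell arr i j ≠ "." then pvCell arr i j else last) = pvCell arr i j :=
        if_pos hc
      have hcomp : pvCompress (List.map (fun i => pvCell arr i j) (i :: is)) =
          pvCell arr i j :: pvCompress (List.map (fun i => pvCell arr i j) is) := by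
        simp [pvCompress, hc]
      rw [pvColLoop, hlast, ih (pvCell arr i j), hcomp, pvHasPair_cons₂]
      by_cases hp : (pvCell arr i j = "T" ∧ last = "S") ∨ (pvCell arr i j = "S" ∧ last = "T")
      · have hp' : (last = "S" ∧ pvCell arr i j = "T") ∨ (last = "T" ∧ pvCell arr i j = "S") := by
          tauto
        simp [hp, hp']
      · have hp' : ¬ ((last = "S" ∧ pvCell arr i j = "T") ∨ (last = "T" ∧ pvCell arr i j = "S")) := by
          tauto
        simp [hp, hp']

lemma pvRowsLoop_eq (arr : List (List String)) (m : Int) (is : List Int) :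
    pvRowsLoop arr m is =
      is.any (fun i => pvHasPair (pvCompress ((PySem.List.pyRange 0 m 1).map (fun j => pvCell arr i j)))) := by
  induction is with
  | nil => simp [pvRowsLoop]
  | cons i is ih =>
    simp only [pvRowsLoop, List.any_cons, ih, pvRowLoop_eq]
    rw [pvHasPair_cons_skip "*" _ (by decide) (by decide)]
    by_cases h : pvHasPair (pvCompress ((PySem.List.pyRange 0 m 1).map (fun j => pvCell arr i j))) = true
    · simp [h]
    · simp [h]

lemma pvColsLoop_eq (arr : List (List String)) (n : Int) (js : List Int) :
    pvColsLoop arr n js =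
      js.any (fun j => pvHasPair (pvCompress ((PySem.List.pyRange 0 n 1).map (fun i => pvCell arr i j)))) := by
  induction js with
  | nil => simp [pvColsLoop]
  | cons j js ih =>
    simp only [pvColsLoop, List.any_cons, ih, pvColLoop_eq]
    rw [pvHasPair_cons_skip "*" _ (by decide) (by decide)]
    by_cases h : pvHasPair (pvCompress ((PySem.List.pyRange 0 n 1).map (fun i => pvCell arr i j))) = true
    · simp [h]
    · simp [h]

-- ===== VERDICT (by name: the statement is the Claim_ definition above) =====
theorem check_spec : Claim_equal_check := by
  intro arr n m _ _
  unfold Spec_check check check_alt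
  rw [pvRowsLoop_eq, pvColsLoop_eq]
  simp only [List.any_append, List.any_map, Function.comp_def, pvLineOk_eq_HP]
  by_cases h1 : ((PySem.List.pyRange 0 n 1).any (fun i => pvHasPair (pvCompress ((PySem.List.pyRange 0 m 1).map (fun j => pvCell arr i j))))) = true
  · simp [h1]
  · simp [h1]
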